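-- pv_equiv track=rewrite | github.com/okrojekb/Podstawy-programowania-i-przetwarzania-danych | zestawy_cwiczeniowe/cw_zestaw_4.py | dodanie_wiersza_do_macierzy
-- ===== SOURCE A (Python) =====
-- def dodanie_wiersza_do_macierzy(macierzA, listab,indeks):
--     n=len(macierzA)
--     m=len(macierzA[0])
--     lista = [None for i in range(m)]
--     macierzW = [None for i in range(n+1)]
--     licznik=0
--     for i in range(n):
--         if i==indeks:
--             macierzW[i]=listab
--             licznik=1
--             continue
--         wierszA=lista.copy()
--         wierszA=macierzA[i-licznik]
--         macierzW[i]=wierszA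
--     if licznik==0:
--         macierzW[n]=listab
--     else:
--         macierzW[n]=macierzA[n-1]
--     return macierzW
-- ===== SOURCE B (Python) =====
-- def dodanie_wiersza_do_macierzy(macierzA, listab, indeks):
--     if 0 <= indeks < len(macierzA):
--         return macierzA[:indeks] + [listab] + macierzA[indeks:]
--     return macierzA + [listab]
-- ===== Notes on version B (the rewrite author's own statement) =====
-- stated objective: simpler
-- what changed: Replaced A's index-shifting counter loop over a preallocated None matrix with a single bounds test and slice concatenation macierzA[:indeks] + [listab] + macierzA[indeks:] (append when the index is out of range); Pre_ excludes only the empty matrix, on which A raises IndexError.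
import Mathlib
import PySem

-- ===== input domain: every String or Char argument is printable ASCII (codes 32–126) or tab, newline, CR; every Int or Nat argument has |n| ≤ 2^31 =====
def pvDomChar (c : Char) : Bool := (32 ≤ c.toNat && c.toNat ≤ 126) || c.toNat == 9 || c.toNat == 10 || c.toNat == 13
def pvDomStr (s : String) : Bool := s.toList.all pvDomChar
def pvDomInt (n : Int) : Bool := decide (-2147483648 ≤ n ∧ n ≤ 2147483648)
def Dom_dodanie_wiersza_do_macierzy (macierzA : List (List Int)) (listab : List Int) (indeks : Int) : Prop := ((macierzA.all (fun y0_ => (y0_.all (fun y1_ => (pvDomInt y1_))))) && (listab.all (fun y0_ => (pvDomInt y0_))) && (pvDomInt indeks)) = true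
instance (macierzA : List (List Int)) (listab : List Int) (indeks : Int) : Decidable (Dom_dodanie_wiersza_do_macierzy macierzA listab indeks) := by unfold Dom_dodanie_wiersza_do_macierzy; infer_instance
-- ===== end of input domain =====

-- B replaces A's index-shifting counter loop over a preallocated matrix by a bounds test
-- and slice concatenation (simpler); on the empty matrix A raises IndexError (excluded by Pre_), B returns [listab].


-- ===== PORT A =====
-- loop body of A's 'for i in range(n)': state = (macierzW, licznik)
def stepA (macierzA : List (List Int)) (listab : List Int) (indeks : Int)
    (st : List (List Int) × Int) (i : Int) : List (List Int) × Int :=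
  if i == indeks then (PySem.List.pySetD st.1 i listab, 1)
  else
    -- wierszA = lista.copy() is dead (immediately overwritten on the next line); wierszA = macierzA[i-licznik]
    let wierszA := PySem.List.pyGetD macierzA (i - st.2) []
    (PySem.List.pySetD st.1 i wierszA, st.2)

def dodanie_wiersza_do_macierzy (macierzA : List (List Int)) (listab : List Int) (indeks : Int) : List (List Int) :=
  let n : Int := macierzA.length
  -- m = len(macierzA[0]); on empty macierzA Python raises IndexError here — excluded by Pre_, default [] never read
  let m : Int := (macierzA.getD 0 []).length
  let _lista : List (Option Int) := List.replicate m.toNat none  -- lista = [None for i in range(m)] (only used by the dead copy)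
  let macierzW : List (List Int) := List.replicate (n + 1).toNat []  -- [None]*(n+1); every slot is overwritten before return
  let st := (PySem.List.pyRange 0 n 1).foldl (stepA macierzA listab indeks) (macierzW, 0)
  if st.2 == 0 then PySem.List.pySetD st.1 n listab
  else PySem.List.pySetD st.1 n (PySem.List.pyGetD macierzA (n - 1) [])

-- ===== PORT B =====
def dodanie_wiersza_do_macierzy_alt (macierzA : List (List Int)) (listab : List Int) (indeks : Int) : List (List Int) :=
  if 0 ≤ indeks ∧ indeks < macierzA.length then
    PySem.List.slice macierzA none (some indeks) ++ [listab] ++ PySem.List.slice macierzA (some indeks) none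
  else macierzA ++ [listab]

-- ===== PRECONDITION & SPEC =====
-- Pre_ excludes exactly the empty matrix, on which A raises IndexError at len(macierzA[0]).
def Pre_dodanie_wiersza_do_macierzy (macierzA : List (List Int)) (listab : List Int) (indeks : Int) : Prop :=
  macierzA ≠ []
instance (macierzA : List (List Int)) (listab : List Int) (indeks : Int) : Decidable (Pre_dodanie_wiersza_do_macierzy macierzA listab indeks) := by unfold Pre_dodanie_wiersza_do_macierzy; infer_instance
def pvWitness_dodanie_wiersza_do_macierzy : List (List Int) × List Int × Int := ([[1, 2], [3, 4]], [5, 6], 1)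

def Spec_dodanie_wiersza_do_macierzy (macierzA : List (List Int)) (listab : List Int) (indeks : Int) (out : List (List Int)) : Prop := out = dodanie_wiersza_do_macierzy_alt macierzA listab indeks
instance (macierzA : List (List Int)) (listab : List Int) (indeks : Int) (out : List (List Int)) : Decidable (Spec_dodanie_wiersza_do_macierzy macierzA listab indeks out) := by unfold Spec_dodanie_wiersza_do_macierzy; infer_instance

-- ===== CLAIM (what is proved, stated in full; the proofs are below) =====
def Claim_equal_dodanie_wiersza_do_macierzy : Prop := ∀ (macierzA : List (List Int)) (listab : List Int) (indeks : Int), Dom_dodanie_wiersza_do_macierzy macierzA listab indeks → Pre_dodanie_wiersza_do_macierzy macierzA listab indeks → Spec_dodanie_wiersza_do_macierzy macierzA listab indeks (dodanie_wiersza_do_macierzy macierzA listab indeks)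
-- ===== LEMMAS AND PROOFS =====

-- writing at the junction of a concatenation
theorem pv_set_junction {α : Type} (xs : List α) (y v : α) (ys : List α) :
    (xs ++ y :: ys).set xs.length v = xs ++ v :: ys := by
  simp

-- no row of range(k) hit indeks: the loop has copied the first k rows, licznik = 0
theorem pv_phase0 (macierzA : List (List Int)) (listab : List Int) (indeks : Int)
    (k : Nat) (hk : k ≤ macierzA.length)
    (hno : ∀ j : Nat, j < k → (j : Int) ≠ indeks) :
    (PySem.List.pyRange 0 (k : Int) 1).foldl (stepA macierzA listab indeks)
        (List.replicate (macierzA.length + 1) [], 0) =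
      (macierzA.take k ++ List.replicate (macierzA.length + 1 - k) [], 0) := by
  induction k with
  | zero => simp
  | succ k ih =>
    have hk' : k ≤ macierzA.length := Nat.le_of_succ_le hk
    have hsplit : PySem.List.pyRange 0 ((k : Int) + 1) 1 =
        PySem.List.pyRange 0 (k : Int) 1 ++ [(k : Int)] :=
      PySem.List.pyRange_one_succ_right (by positivity)
    have hkk : ((k + 1 : Nat) : Int) = (k : Int) + 1 := by push_cast; ring
    rw [hkk, hsplit, List.foldl_append, ih hk' (fun j hj => hno j (Nat.lt_succ_of_lt hj))]
    have hne : ((k : Int) == indeks) = false := by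
      simp only [beq_eq_false_iff_ne]; exact hno k (Nat.lt_succ_self k)
    have hklt : k < macierzA.length := hk
    have hget : PySem.List.pyGetD macierzA ((k : Int) - 0) ([] : List Int) = macierzA[k] := by
      rw [show ((k : Int) - 0) = (k : Int) by ring]
      rw [PySem.List.pyGetD_natCast, List.getD_eq_getElem _ _ hklt]
    simp only [List.foldl_cons, List.foldl_nil, stepA, hne, Bool.false_eq_true, if_false, hget]
    have hrep : List.replicate (macierzA.length + 1 - k) ([] : List Int) =
        [] :: List.replicate (macierzA.length - k) [] := by
      rw [← List.replicate_succ]; congr 1; omega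
    have hlen : (macierzA.take k).length = k := List.length_take_of_le hk'
    have hset := pv_set_junction (macierzA.take k) ([] : List Int) (macierzA[k])
      (List.replicate (macierzA.length - k) [])
    rw [hlen] at hset
    have hc : macierzA.length + 1 - (k + 1) = macierzA.length - k := by omega
    have htk : List.take (k + 1) macierzA = List.take k macierzA ++ [macierzA[k]] := by
      rw [List.take_add_one, List.getElem?_eq_getElem hklt]; rfl
    rw [PySem.List.pySetD_natCast, hrep, hset, hc, htk, List.append_assoc,
      List.singleton_append]

-- indeks = j was hit: after range(k) (j < k ≤ n) the state is
-- take j ++ listab :: ((drop j).take (k-1-j) ++ padding) with licznik = 1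
theorem pv_phase1 (macierzA : List (List Int)) (listab : List Int) (j : Nat)
    (hj : j < macierzA.length) (k : Nat) (hjk : j + 1 ≤ k) (hk : k ≤ macierzA.length) :
    (PySem.List.pyRange 0 (k : Int) 1).foldl (stepA macierzA listab (j : Int))
        (List.replicate (macierzA.length + 1) [], 0) =
      (macierzA.take j ++ listab ::
        ((macierzA.drop j).take (k - 1 - j) ++ List.replicate (macierzA.length + 1 - k) []), 1) := by
  induction k, hjk using Nat.le_induction with
  | base =>
    have hkk : ((j + 1 : Nat) : Int) = (j : Int) + 1 := by push_cast; ring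
    have hsplit : PySem.List.pyRange 0 ((j : Int) + 1) 1 =
        PySem.List.pyRange 0 (j : Int) 1 ++ [(j : Int)] :=
      PySem.List.pyRange_one_succ_right (by positivity)
    rw [hkk, hsplit, List.foldl_append,
      pv_phase0 macierzA listab (j : Int) j (Nat.le_of_lt hj)
        (fun i hi => by exact_mod_cast Nat.ne_of_lt hi)]
    simp only [List.foldl_cons, List.foldl_nil, stepA, beq_self_eq_true, if_true]
    have hrep : List.replicate (macierzA.length + 1 - j) ([] : List Int) =
        [] :: List.replicate (macierzA.length - j) [] := by
      rw [← List.replicate_succ]; congr 1; omega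
    have hlen : (macierzA.take j).length = j := List.length_take_of_le (Nat.le_of_lt hj)
    have hset := pv_set_junction (macierzA.take j) ([] : List Int) listab
      (List.replicate (macierzA.length - j) [])
    rw [hlen] at hset
    have hc1 : j + 1 - 1 - j = 0 := by omega
    have hc2 : macierzA.length + 1 - (j + 1) = macierzA.length - j := by omega
    rw [PySem.List.pySetD_natCast, hrep, hset, hc1, hc2]
    simp
  | succ k hjk ih =>
    have hk' : k ≤ macierzA.length := Nat.le_of_succ_le hk
    have hkk : ((k + 1 : Nat) : Int) = (k : Int) + 1 := by push_cast; ring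
    have hsplit : PySem.List.pyRange 0 ((k : Int) + 1) 1 =
        PySem.List.pyRange 0 (k : Int) 1 ++ [(k : Int)] :=
      PySem.List.pyRange_one_succ_right (by positivity)
    rw [hkk, hsplit, List.foldl_append, ih hk']
    have hne : ((k : Int) == (j : Int)) = false := by
      simp only [beq_eq_false_iff_ne, ne_eq, Int.natCast_inj]
      omega
    have hklt : k - 1 < macierzA.length := by omega
    have hget : PySem.List.pyGetD macierzA ((k : Int) - 1) ([] : List Int) = macierzA[k - 1] := by
      rw [show ((k : Int) - 1) = ((k - 1 : Nat) : Int) by omega]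
      rw [PySem.List.pyGetD_natCast, List.getD_eq_getElem _ _ hklt]
    simp only [List.foldl_cons, List.foldl_nil, stepA, hne, Bool.false_eq_true, if_false, hget]
    have hrep : List.replicate (macierzA.length + 1 - k) ([] : List Int) =
        [] :: List.replicate (macierzA.length - k) [] := by
      rw [← List.replicate_succ]; congr 1; omega
    have hlen : (macierzA.take j ++ listab :: (macierzA.drop j).take (k - 1 - j)).length = k := by
      have h2 : ((macierzA.drop j).take (k - 1 - j)).length = k - 1 - j := by
        rw [List.length_take, List.length_drop]; omega
      simp [List.length_take_of_le (Nat.le_of_lt hj), h2]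
      omega
    have hassoc : macierzA.take j ++ listab ::
        ((macierzA.drop j).take (k - 1 - j) ++ ([] : List Int) :: List.replicate (macierzA.length - k) []) =
        (macierzA.take j ++ listab :: (macierzA.drop j).take (k - 1 - j)) ++
          ([] : List Int) :: List.replicate (macierzA.length - k) [] := by
      simp
    have hset := pv_set_junction (macierzA.take j ++ listab :: (macierzA.drop j).take (k - 1 - j))
      ([] : List Int) (macierzA[k - 1]) (List.replicate (macierzA.length - k) [])
    rw [hlen] at hset
    have hc1 : k + 1 - 1 - j = (k - 1 - j) + 1 := by omega
    have hc2 : macierzA.length + 1 - (k + 1) = macierzA.length - k := by omega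
    rw [PySem.List.pySetD_natCast, hrep, hassoc, hset, hc1, hc2,
      List.take_add_one, List.getElem?_drop,
      show j + (k - 1 - j) = k - 1 by omega, List.getElem?_eq_getElem hklt]
    simp

-- when the index is out of range no iteration hits it
theorem pv_nohit (macierzA : List (List Int)) (indeks : Int)
    (h : ¬ (0 ≤ indeks ∧ indeks < (macierzA.length : Int))) :
    ∀ j : Nat, j < macierzA.length → (j : Int) ≠ indeks := by
  intro j hj heq
  apply h
  constructor
  · rw [← heq]; positivity
  · rw [← heq]; exact_mod_cast hj

-- ===== VERDICT (by name: the statement is the Claim_ definition above) =====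
theorem dodanie_wiersza_do_macierzy_spec : Claim_equal_dodanie_wiersza_do_macierzy := by
  intro macierzA listab indeks _hDom hPre
  have hN : 0 < macierzA.length := List.length_pos_of_ne_nil hPre
  have hcast : ((macierzA.length : Int) + 1).toNat = macierzA.length + 1 := by omega
  simp only [Spec_dodanie_wiersza_do_macierzy, dodanie_wiersza_do_macierzy,
    dodanie_wiersza_do_macierzy_alt]
  rw [hcast]
  by_cases hin : 0 ≤ indeks ∧ indeks < (macierzA.length : Int)
  · -- in range: A inserts at indeks, B slices
    obtain ⟨h0, h1⟩ := hin
    have hjeq : ((indeks.toNat : Nat) : Int) = indeks := Int.toNat_of_nonneg h0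
    set j : Nat := indeks.toNat with hjdef
    have hjlt : j < macierzA.length := by omega
    have hfold := pv_phase1 macierzA listab j hjlt macierzA.length (by omega) (le_refl _)
    rw [← hjeq, hfold]
    have hone : ((1 : Int) == 0) = false := by decide
    simp only [hone, Bool.false_eq_true, if_false]
    have hgl : PySem.List.pyGetD macierzA ((macierzA.length : Int) - 1) ([] : List Int) =
        macierzA[macierzA.length - 1] := by
      rw [show ((macierzA.length : Int) - 1) = ((macierzA.length - 1 : Nat) : Int) by omega]
      rw [PySem.List.pyGetD_natCast, List.getD_eq_getElem _ _ (by omega)]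
    have hrep1 : List.replicate (macierzA.length + 1 - macierzA.length) ([] : List Int) = [[]] := by
      rw [show macierzA.length + 1 - macierzA.length = 1 by omega]; rfl
    have hlen : (macierzA.take j ++ listab :: (macierzA.drop j).take (macierzA.length - 1 - j)).length
        = macierzA.length := by
      have h2 : ((macierzA.drop j).take (macierzA.length - 1 - j)).length
          = macierzA.length - 1 - j := by
        rw [List.length_take, List.length_drop]; omega
      simp [List.length_take_of_le (Nat.le_of_lt hjlt), h2]
      omega
    have hassoc : macierzA.take j ++ listab ::
        ((macierzA.drop j).take (macierzA.length - 1 - j) ++ [([] : List Int)]) =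
        (macierzA.take j ++ listab :: (macierzA.drop j).take (macierzA.length - 1 - j))
          ++ ([] : List Int) :: [] := by
      simp
    have hset := pv_set_junction
      (macierzA.take j ++ listab :: (macierzA.drop j).take (macierzA.length - 1 - j))
      ([] : List Int) (macierzA[macierzA.length - 1]) []
    rw [hlen] at hset
    have hdropfull : (macierzA.drop j).take (macierzA.length - 1 - j)
        ++ [macierzA[macierzA.length - 1]] = macierzA.drop j := by
      have hfull : (macierzA.drop j).take (macierzA.length - j) = macierzA.drop j := by
        apply List.take_of_length_le
        rw [List.length_drop]
      conv_rhs => rw [← hfull, show macierzA.length - j = (macierzA.length - 1 - j) + 1 by omega]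
      rw [List.take_add_one, List.getElem?_drop,
        show j + (macierzA.length - 1 - j) = macierzA.length - 1 by omega,
        List.getElem?_eq_getElem (by omega)]
      rfl
    rw [hrep1, hgl, hassoc, PySem.List.pySetD_natCast, hset,
      if_pos ⟨by positivity, by exact_mod_cast hjlt⟩,
      PySem.List.slice_to _ (by positivity), PySem.List.slice_from _ (by positivity)]
    simp only [Int.toNat_natCast]
    rw [List.append_assoc, List.cons_append, hdropfull]
    simp
  · -- out of range: A appends, B appends
    have hfold := pv_phase0 macierzA listab indeks macierzA.length (le_refl _)
      (pv_nohit macierzA indeks hin)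
    rw [hfold]
    have hzero : ((0 : Int) == 0) = true := by decide
    simp only [hzero, if_true]
    have hrep1 : List.replicate (macierzA.length + 1 - macierzA.length) ([] : List Int) = [[]] := by
      rw [show macierzA.length + 1 - macierzA.length = 1 by omega]; rfl
    rw [hrep1, List.take_length, if_neg hin, PySem.List.pySetD_natCast]
    exact pv_set_junction macierzA [] listab []
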